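-- pv_equiv track=rewrite | github.com/Rodrycue18/Algorithims1 | python/guia7.py | vocalesRepitidas
-- ===== SOURCE A (Python) =====
-- vocal = list("aeiou")
--
-- def vocalesRepitidas (palabra):
--     a=[]
--     for i in palabra:
--         for j in vocal:
--             if i==j:
--                 a.append(i)
--     if a.count('a') >= 2 or a.count('e') >= 2 or a.count('i') >= 2 or a.count('o') >= 2 or a.count('u') >= 2:
--         return False
--     return True
-- ===== SOURCE B (Python) =====
-- def vocalesRepitidas(palabra):
--     seen = set()
--     for c in palabra:
--         if c in "aeiou":
--             if c in seen:
--                 return False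
--             seen.add(c)
--     return True
-- ===== Notes on version B (the rewrite author's own statement) =====
-- stated objective: faster
-- what changed: Replaces the build-a-list-of-all-vowel-hits (each char compared against all five vowels) plus five .count scans with a single pass keeping a seen set of vowels that returns False at the first repeated vowel.
import Mathlib
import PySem

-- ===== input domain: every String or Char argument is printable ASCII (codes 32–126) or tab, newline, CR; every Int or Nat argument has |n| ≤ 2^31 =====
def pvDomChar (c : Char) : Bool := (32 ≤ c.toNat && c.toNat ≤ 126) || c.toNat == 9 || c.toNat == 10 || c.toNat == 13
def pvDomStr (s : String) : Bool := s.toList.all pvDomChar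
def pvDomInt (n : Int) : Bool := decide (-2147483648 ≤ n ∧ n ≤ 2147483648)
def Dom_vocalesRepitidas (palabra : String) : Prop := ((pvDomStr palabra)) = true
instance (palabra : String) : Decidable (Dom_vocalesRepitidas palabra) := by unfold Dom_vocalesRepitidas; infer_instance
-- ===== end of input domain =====

-- B replaces A's build-all-vowel-hits list plus five .count scans by a single
-- early-exit pass with a seen set of vowels (objective: idiomatic).


-- ===== PORT A =====
-- vocal = list("aeiou")
def vocal : List Char := "aeiou".toList

def vocalesRepitidas (palabra : String) : Bool :=
  let a : List Char :=
    palabra.toList.foldl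
      (fun acc i => vocal.foldl (fun acc2 j => if i == j then acc2 ++ [i] else acc2) acc) []
  if 2 ≤ a.count 'a' || 2 ≤ a.count 'e' || 2 ≤ a.count 'i' || 2 ≤ a.count 'o' || 2 ≤ a.count 'u'
  then false else true

-- ===== PORT B =====
-- 'c in "aeiou"' on a single character is exactly membership of c in the string's characters
def vrGo : List Char → PySem.Set Char → Bool
  | [], _ => true
  | c :: rest, seen =>
    if "aeiou".toList.contains c then
      if PySem.Set.contains seen c then false
      else vrGo rest (PySem.Set.add seen c)
    else vrGo rest seen

def vocalesRepitidas_alt (palabra : String) : Bool :=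
  vrGo palabra.toList PySem.Set.empty

-- ===== PRECONDITION & SPEC =====
def Spec_vocalesRepitidas (palabra : String) (out : Bool) : Prop := out = vocalesRepitidas_alt palabra
instance (palabra : String) (out : Bool) : Decidable (Spec_vocalesRepitidas palabra out) := by unfold Spec_vocalesRepitidas; infer_instance

-- ===== CLAIM (what is proved, stated in full; the proofs are below) =====
def Claim_equal_vocalesRepitidas : Prop := ∀ (palabra : String), Dom_vocalesRepitidas palabra → Spec_vocalesRepitidas palabra (vocalesRepitidas palabra)

-- ===== LEMMAS AND PROOFS =====

theorem vocal_eq : vocal = ['a','e','i','o','u'] := by decide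

-- A's inner loop over the five vowels appends i exactly when i is a vowel
theorem vocal_inner (i : Char) (acc : List Char) :
    vocal.foldl (fun acc2 j => if i == j then acc2 ++ [i] else acc2) acc
      = if vocal.contains i then acc ++ [i] else acc := by
  rw [vocal_eq]
  by_cases h1 : i = 'a' <;> by_cases h2 : i = 'e' <;> by_cases h3 : i = 'i' <;>
    by_cases h4 : i = 'o' <;> by_cases h5 : i = 'u' <;> simp_all [List.foldl]

-- A's outer loop builds the list of vowel occurrences, in order
theorem vocal_build (cs : List Char) (acc : List Char) :
    cs.foldl (fun acc i => vocal.foldl (fun acc2 j => if i == j then acc2 ++ [i] else acc2) acc) acc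
      = acc ++ cs.filter (fun i => vocal.contains i) := by
  have hbody : (fun (acc : List Char) i =>
      vocal.foldl (fun acc2 j => if i == j then acc2 ++ [i] else acc2) acc)
      = fun acc i => if vocal.contains i then acc ++ [i] else acc := by
    funext acc i; exact vocal_inner i acc
  rw [hbody, PySem.List.foldl_append_if_eq_filter]

theorem count_filter_vocal (cs : List Char) (v : Char) (hv : v ∈ vocal) :
    (cs.filter (fun i => vocal.contains i)).count v = cs.count v := by
  rw [List.count_filter]
  simp [hv]

-- characterisation of B's loop
theorem vrGo_iff (cs : List Char) (seen : PySem.Set Char) :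
    vrGo cs seen = true ↔
      ∀ v ∈ vocal, cs.count v + (if v ∈ seen then 1 else 0) ≤ 1 := by
  induction cs generalizing seen with
  | nil =>
    simp only [vrGo, true_iff]
    intro v _
    rw [List.count_nil]
    split <;> omega
  | cons c rest ih =>
    simp only [vrGo]
    by_cases hc : c ∈ vocal
    · have hc' : "aeiou".toList.contains c = true := by
        rw [List.contains_eq_mem]; rw [vocal_eq] at hc; simpa using hc
      simp only [hc', if_true]
      by_cases hs : c ∈ seen
      · have hs' : PySem.Set.contains seen c = true := by
          simp [PySem.Set.contains, List.contains_eq_mem, hs]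
        simp only [hs', if_true]
        constructor
        · intro h; exact absurd h (by simp)
        · intro h
          have t := h c hc
          rw [List.count_cons_self, if_pos hs] at t
          omega
      · have hs' : PySem.Set.contains seen c = false := by
          simp [PySem.Set.contains, List.contains_eq_mem, hs]
        simp only [hs', Bool.false_eq_true, if_false, ih]
        constructor <;>
        · intro h v hv
          have t := h v hv
          by_cases hvc : v = c <;> by_cases hv2 : v ∈ seen <;>
            simp_all [PySem.Set.add, PySem.Set.contains, List.count_cons, List.mem_append] <;>
            simp_all [show (c = v) ↔ False from ⟨fun e => hvc e.symm, False.elim⟩]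
    · have hc' : "aeiou".toList.contains c = false := by
        rw [Bool.eq_false_iff, Ne, List.contains_eq_mem, decide_eq_true_iff]
        rw [vocal_eq] at hc; simpa using hc
      simp only [hc', Bool.false_eq_true, if_false, ih]
      constructor <;>
      · intro h v hv
        have hne : c ≠ v := fun e => hc (e ▸ hv)
        have := h v hv
        simp [hne] at this ⊢
        omega

-- ===== VERDICT (by name: the statement is the Claim_ definition above) =====
theorem vocalesRepitidas_spec : Claim_equal_vocalesRepitidas := by
  intro palabra _
  unfold Spec_vocalesRepitidas
  rw [Bool.eq_iff_iff]
  simp only [vocalesRepitidas, vocalesRepitidas_alt]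
  rw [vocal_build, List.nil_append, vrGo_iff]
  have e1 := count_filter_vocal palabra.toList 'a' (by decide)
  have e2 := count_filter_vocal palabra.toList 'e' (by decide)
  have e3 := count_filter_vocal palabra.toList 'i' (by decide)
  have e4 := count_filter_vocal palabra.toList 'o' (by decide)
  have e5 := count_filter_vocal palabra.toList 'u' (by decide)
  rw [e1, e2, e3, e4, e5]
  have hseen : ∀ v : Char, (if v ∈ (PySem.Set.empty : PySem.Set Char) then 1 else 0) = 0 := by
    intro v; simp [PySem.Set.empty]
  simp only [hseen, Nat.add_zero]
  constructor
  · intro h v hv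
    by_cases hb : (2 ≤ palabra.toList.count 'a' || 2 ≤ palabra.toList.count 'e' ||
        2 ≤ palabra.toList.count 'i' || 2 ≤ palabra.toList.count 'o' ||
        2 ≤ palabra.toList.count 'u' : Bool) = true
    · rw [if_pos hb] at h; simp at h
    · simp only [Bool.or_eq_true, decide_eq_true_eq, not_or, not_le] at hb
      have hv5 : v = 'a' ∨ v = 'e' ∨ v = 'i' ∨ v = 'o' ∨ v = 'u' := by
        rw [vocal_eq] at hv; simpa using hv
      rcases hv5 with h | h | h | h | h <;> subst h <;> omega
  · intro h
    have h1 := h 'a' (by decide); have h2 := h 'e' (by decide)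
    have h3 := h 'i' (by decide); have h4 := h 'o' (by decide)
    have h5 := h 'u' (by decide)
    rw [if_neg]
    simp only [Bool.or_eq_true, decide_eq_true_eq, not_or, not_le]
    omega
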